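-- pv_equiv track=rewrite | github.com/jinyangl312/msms_io | fasta/entrapment.py | add_loop_linker
-- ===== SOURCE A (Python) =====
-- import itertools
--
-- def add_loop_linker(sequence, is_C_term, src_aa, dest_aa):
--   result = []
--
--   M_indices = [i for i in range(len(sequence)) if sequence[i] == src_aa]
--   comb = itertools.combinations(M_indices, 2)
--   for indices in comb:
--       # Pep C term but not Pro C term
--       if (indices[0] == len(sequence) - 1 or indices[1] == len(sequence) - 1) and not is_C_term:
--         continue
--
--       new_s = "".join([sequence[i] if i not in indices else dest_aa for i in range(len(sequence))])
--
--       result.append(new_s)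
--
--   return result
-- ===== SOURCE B (Python) =====
-- def add_loop_linker(sequence, is_C_term, src_aa, dest_aa):
--     pos = [i for i, c in enumerate(sequence) if c == src_aa]
--     # The C-term guard of the task reduces to one trim: only the last source
--     # position can be the last residue, so drop it up front unless is_C_term.
--     if not is_C_term and pos and pos[-1] == len(sequence) - 1:
--         pos = pos[:-1]
--     return [sequence[:i] + dest_aa + sequence[i + 1:j] + dest_aa + sequence[j + 1:]
--             for k, i in enumerate(pos) for j in pos[k + 1:]]
-- ===== Notes on version B (the rewrite author's own statement) =====
-- stated objective: simpler
-- what changed: The per-pair C-term skip guard is eliminated entirely by trimming the last source position from the position list once up front (only the last position can be the last residue), and each output string is assembled from three slices of the original sequence joined around dest_aa instead of A's per-character tuple-membership comprehension over the whole sequence.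
import Mathlib
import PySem

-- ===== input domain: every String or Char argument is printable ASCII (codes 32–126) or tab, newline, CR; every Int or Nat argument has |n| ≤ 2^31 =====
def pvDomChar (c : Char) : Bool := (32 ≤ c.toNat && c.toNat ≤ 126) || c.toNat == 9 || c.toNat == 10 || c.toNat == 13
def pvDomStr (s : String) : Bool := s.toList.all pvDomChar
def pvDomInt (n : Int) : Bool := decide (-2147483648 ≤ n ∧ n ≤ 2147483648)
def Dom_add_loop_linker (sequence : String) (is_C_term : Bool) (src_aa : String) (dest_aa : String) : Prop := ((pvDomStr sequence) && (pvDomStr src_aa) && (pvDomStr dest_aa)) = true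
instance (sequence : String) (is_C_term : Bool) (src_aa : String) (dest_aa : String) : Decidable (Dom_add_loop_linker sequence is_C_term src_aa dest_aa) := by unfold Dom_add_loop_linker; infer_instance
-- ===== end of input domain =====

-- B replaces A's per-pair C-term guard by trimming the last source position once up front
-- and builds each output from three slices around dest_aa; objective: simpler.

-- ===== PORT A =====
-- itertools.combinations(xs, 2), in Python's order
def pyCombPairs : List Int → List (Int × Int)
  | [] => []
  | x :: xs => xs.map (fun y => (x, y)) ++ pyCombPairs xs

def add_loop_linker (sequence : String) (is_C_term : Bool) (src_aa : String) (dest_aa : String) : List String :=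
  (pyCombPairs ((PySem.List.pyRange 0 (PySem.Str.len sequence) 1).filter
      (fun i => ((PySem.Str.pyGet? sequence i).map (fun c => String.ofList [c])) == some src_aa))).foldl
    (fun result indices =>
      if (indices.1 == PySem.Str.len sequence - 1 || indices.2 == PySem.Str.len sequence - 1) && !is_C_term then
        result
      else
        -- sequence[i] for i in range(len(sequence)) is always in range; the "" default is unreachable
        result ++ [PySem.Str.join ""
          ((PySem.List.pyRange 0 (PySem.Str.len sequence) 1).map (fun i =>
            if !(i == indices.1 || i == indices.2) then
              ((PySem.Str.pyGet? sequence i).map (fun c => String.ofList [c])).getD ""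
            else dest_aa))]) []

-- ===== PORT B =====
-- sequence[:i] + dest_aa + sequence[i+1:j] + dest_aa + sequence[j+1:]  (string slices on the code points)
def altSplice (sequence : String) (dest_aa : String) (i j : Int) : String :=
  String.ofList (PySem.List.slice sequence.toList none (some i) ++ dest_aa.toList ++
    PySem.List.slice sequence.toList (some (i + 1)) (some j) ++ dest_aa.toList ++
    PySem.List.slice sequence.toList (some (j + 1)) none)

def add_loop_linker_alt (sequence : String) (is_C_term : Bool) (src_aa : String) (dest_aa : String) : List String :=
  let pos0 : List Int := (PySem.List.enumerate sequence.toList 0).filterMap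
      (fun p => if String.ofList [p.2] == src_aa then some p.1 else none)
  -- 'if not is_C_term and pos and pos[-1] == len(sequence) - 1: pos = pos[:-1]'
  let pos : List Int :=
    if !is_C_term && !(pos0 == []) && (PySem.List.pyGet? pos0 (-1) == some (PySem.Str.len sequence - 1))
    then PySem.List.slice pos0 none (some (-1)) else pos0
  -- '[splice(i, j) for k, i in enumerate(pos) for j in pos[k+1:]]'
  (PySem.List.enumerate pos 0).flatMap (fun ki =>
    (PySem.List.slice pos (some (ki.1 + 1)) none).map (fun j => altSplice sequence dest_aa ki.2 j))

-- ===== PRECONDITION & SPEC =====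
def Spec_add_loop_linker (sequence : String) (is_C_term : Bool) (src_aa : String) (dest_aa : String) (out : List String) : Prop := out = add_loop_linker_alt sequence is_C_term src_aa dest_aa
instance (sequence : String) (is_C_term : Bool) (src_aa : String) (dest_aa : String) (out : List String) : Decidable (Spec_add_loop_linker sequence is_C_term src_aa dest_aa out) := by unfold Spec_add_loop_linker; infer_instance

-- ===== CLAIM (what is proved, stated in full; the proofs are below) =====
def Claim_equal_add_loop_linker : Prop := ∀ (sequence : String) (is_C_term : Bool) (src_aa : String) (dest_aa : String), Dom_add_loop_linker sequence is_C_term src_aa dest_aa → Spec_add_loop_linker sequence is_C_term src_aa dest_aa (add_loop_linker sequence is_C_term src_aa dest_aa)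

-- ===== LEMMAS AND PROOFS =====

-- a guarded identity filterMap is a filter (glue between B's comprehension and A's)
theorem filterMap_ite_filter (xs : List Int) (f g : Int → Bool) (h : ∀ i ∈ xs, f i = g i) :
    xs.filterMap (fun i => if f i then some i else none) = xs.filter g := by
  induction xs with
  | nil => rfl
  | cons x xs ih =>
    simp only [List.filterMap_cons, List.filter_cons, h x (by simp)]
    rcases hg : g x <;> simp [ih (fun i hi => h i (by simp [hi]))]

-- the two position lists coincide
theorem positions_eq (sequence src_aa : String) :
    ((PySem.List.enumerate sequence.toList 0).filterMap
      (fun p => if String.ofList [p.2] == src_aa then some p.1 else none)) =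
    (PySem.List.pyRange 0 (PySem.Str.len sequence) 1).filter
      (fun i => ((PySem.Str.pyGet? sequence i).map (fun c => String.ofList [c])) == some src_aa) := by
  rw [PySem.List.enumerate_eq_map_pyRange _ 'a', List.filterMap_map]
  have hlen : PySem.List.len sequence.toList = PySem.Str.len sequence := by
    simp [PySem.List.len, PySem.Str.len_eq]
  rw [hlen]
  apply filterMap_ite_filter
  intro i hi
  obtain ⟨h0, h1⟩ := PySem.List.mem_pyRange_one.mp hi
  rw [PySem.Str.len_eq] at h1
  obtain ⟨k, rfl⟩ : ∃ k : Nat, i = (k : Int) := ⟨i.toNat, (Int.toNat_of_nonneg h0).symm⟩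
  have hk : k < sequence.toList.length := by exact_mod_cast h1
  simp [PySem.List.pyGetD_of_nonneg _ _ h0, List.getD_eq_getElem?_getD,
    List.getElem?_eq_getElem hk]

-- components of a combination pair are members of the source list
theorem pyCombPairs_mem {M : List Int} {p : Int × Int} (hp : p ∈ pyCombPairs M) :
    p.1 ∈ M ∧ p.2 ∈ M := by
  induction M with
  | nil => cases hp
  | cons x xs ih =>
    rcases List.mem_append.mp hp with h | h
    · obtain ⟨y, hy, rfl⟩ := List.mem_map.mp h
      exact ⟨by simp, by simp [hy]⟩
    · exact ⟨List.mem_cons_of_mem _ (ih h).1, List.mem_cons_of_mem _ (ih h).2⟩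

-- on a strictly increasing list, every combination pair is increasing
theorem pyCombPairs_lt {M : List Int} (hM : M.Pairwise (· < ·)) :
    ∀ p ∈ pyCombPairs M, p.1 < p.2 := by
  induction M with
  | nil => intro p hp; cases hp
  | cons x xs ih =>
    intro p hp
    rcases List.mem_append.mp hp with h | h
    · obtain ⟨y, hy, rfl⟩ := List.mem_map.mp h
      exact (List.pairwise_cons.mp hM).1 y hy
    · exact ih (List.pairwise_cons.mp hM).2 p h

-- dropping all pairs that touch the appended last element leaves the pairs of the prefix
theorem pyCombPairs_filter_concat (ys : List Int) (z : Int) (hz : z ∉ ys) :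
    (pyCombPairs (ys ++ [z])).filter (fun p => !(p.1 == z || p.2 == z)) = pyCombPairs ys := by
  induction ys with
  | nil => rfl
  | cons y ys ih =>
    have hyz : y ≠ z := fun h => hz (h ▸ List.mem_cons_self)
    have hz' : z ∉ ys := fun h => hz (List.mem_cons_of_mem _ h)
    simp only [List.cons_append, pyCombPairs, List.filter_append, List.filter_map]
    rw [ih hz']
    congr 1
    have hy0 : (y == z) = false := beq_eq_false_iff_ne.mpr hyz
    have hys : ((ys ++ [z]).filter (fun w => !((y == z) || (w == z)))) = ys := by
      simp only [hy0, Bool.false_or]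
      rw [List.filter_append]
      have h1 : ys.filter (fun w => !(w == z)) = ys :=
        List.filter_eq_self.mpr (fun a ha => by
          simp only [Bool.not_eq_eq_eq_not, Bool.not_true, beq_eq_false_iff_ne, ne_eq]
          exact fun h => hz' (h ▸ ha))
      simp [h1]
    simpa [Function.comp_def] using congrArg (List.map (fun w => (y, w))) hys

-- on a strictly increasing list bounded by n, n-1 can only be the last element
theorem getLast?_of_mem_max {M : List Int} {n : Int} (hM : M.Pairwise (· < ·))
    (hb : ∀ i ∈ M, i < n) (hmem : (n - 1) ∈ M) : M.getLast? = some (n - 1) := by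
  induction M with
  | nil => cases hmem
  | cons x xs ih =>
    rcases List.mem_cons.mp hmem with rfl | hmem2
    · cases xs with
      | nil => rfl
      | cons y ys =>
        have h1 := (List.pairwise_cons.mp hM).1 y (by simp)
        have h2 := hb y (by simp)
        omega
    · cases xs with
      | nil => cases hmem2
      | cons y ys =>
        rw [List.getLast?_cons_cons]
        exact ih (List.pairwise_cons.mp hM).2 (fun i hi => hb i (List.mem_cons_of_mem _ hi)) hmem2

-- xs[-1] is the last element
theorem pyGet?_neg_one (xs : List Int) : PySem.List.pyGet? xs (-1) = xs.getLast? := by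
  cases xs with
  | nil => rfl
  | cons x t =>
    simp [PySem.List.pyGet?, PySem.List.pyIdx?, List.getLast?_eq_getElem?]

-- join with the empty separator is flatten (specialises Chars.join = intercalate)
theorem chars_join_nil_flatten (xs : List (List Char)) : PySem.Chars.join [] xs = xs.flatten := by
  show ([] : List Char).intercalate xs = xs.flatten
  induction xs with
  | nil => rfl
  | cons h t iht => cases t <;> simp_all [List.intercalate, List.intersperse]

-- a run of in-range single-character pieces flattens to the corresponding segment
theorem flatten_singletons_seg (seq : List Char) :
    ∀ (k : Nat) (u v : Int), 0 ≤ u → v ≤ (seq.length : Int) → (v - u).toNat = k →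
    ((PySem.List.pyRange u v 1).map
        (fun i => ((PySem.List.pyGet? seq i).map (fun c => [c])).getD [])).flatten
      = (seq.drop u.toNat).take (v - u).toNat := by
  intro k
  induction k with
  | zero =>
    intro u v h0 hv hk
    rw [PySem.List.pyRange_one_eq_nil (by omega), hk]
    simp
  | succ m ih =>
    intro u v h0 hv hk
    have huv : u < v := by omega
    obtain ⟨w, rfl⟩ : ∃ w : Nat, u = (w : Int) := ⟨u.toNat, by omega⟩
    have hu : w < seq.length := by omega
    rw [PySem.List.pyRange_one_cons huv]
    have hget : PySem.List.pyGet? seq ((w : Nat) : Int) = some seq[w] := by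
      simp [List.getElem?_eq_getElem hu]
    rw [List.map_cons, List.flatten_cons, hget,
      ih ((w : Int) + 1) v (by omega) hv (by omega)]
    simp only [Option.map_some, Option.getD_some]
    have h1 : (v - (w : Int)).toNat = (v - ((w : Int) + 1)).toNat + 1 := by omega
    have h2 : ((w : Int) + 1).toNat = w + 1 := by omega
    have h3 : ((w : Int)).toNat = w := Int.toNat_natCast w
    rw [h1, h2, h3, List.drop_eq_getElem_cons hu, List.take_succ_cons]
    rfl

-- per-pair equality: A's joined comprehension = B's three-slice splice
theorem splice_eq (sequence dest_aa : String) (a b : Int)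
    (ha : 0 ≤ a) (hab : a < b) (hb : b < PySem.Str.len sequence) :
    PySem.Str.join ""
      ((PySem.List.pyRange 0 (PySem.Str.len sequence) 1).map (fun i =>
        if !(i == a || i == b) then
          ((PySem.Str.pyGet? sequence i).map (fun c => String.ofList [c])).getD ""
        else dest_aa)) = altSplice sequence dest_aa a b := by
  set seq := sequence.toList with hseq
  have hn : PySem.Str.len sequence = (seq.length : Int) := by
    simp [PySem.Str.len_eq, hseq]
  rw [hn] at hb ⊢
  set n : Int := (seq.length : Int) with hndef
  -- reduce to equality of the underlying character lists
  have ofList_of_toList : ∀ (s : String) (cs : List Char), s.toList = cs → s = String.ofList cs := by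
    intro s cs h
    rw [← h, String.ofList_toList]
  unfold altSplice
  apply ofList_of_toList
  rw [PySem.Str.toList_join, List.map_map]
  have hstr : ("" : String).toList = [] := rfl
  rw [hstr, chars_join_nil_flatten]
  -- each piece's character list
  have hpiece : (String.toList ∘ fun i =>
      if !(i == a || i == b) then
        ((PySem.Str.pyGet? sequence i).map (fun c => String.ofList [c])).getD ""
      else dest_aa) = (fun i =>
      if !(i == a || i == b) then
        ((PySem.List.pyGet? seq i).map (fun c => [c])).getD []
      else dest_aa.toList) := by
    funext i
    simp only [Function.comp_apply]
    cases hc : (!(i == a || i == b)) with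
    | false => rw [if_neg (by simp), if_neg (by simp)]
    | true =>
      rw [if_pos (by simp), if_pos (by simp)]
      have hSg : PySem.Str.pyGet? sequence i = PySem.List.pyGet? seq i := by
        simp [hseq]
      rw [hSg]
      cases PySem.List.pyGet? seq i with
      | none => rfl
      | some c => simp
  rw [hpiece]
  -- split the index range at a, a+1, b, b+1
  rw [PySem.List.pyRange_one_append 0 a n ha (by omega),
    PySem.List.pyRange_one_cons (show a < n by omega),
    PySem.List.pyRange_one_append (a + 1) b n (by omega) (by omega),
    PySem.List.pyRange_one_cons (show b < n by omega)]
  simp only [List.map_append, List.map_cons, List.flatten_append, List.flatten_cons]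
  have hGa : (if !((a == a) || (a == b)) then
      ((PySem.List.pyGet? seq a).map (fun c => [c])).getD [] else dest_aa.toList) = dest_aa.toList := by
    simp only [beq_self_eq_true, Bool.true_or, Bool.not_true, Bool.false_eq_true, if_false]
  have hGb : (if !((b == a) || (b == b)) then
      ((PySem.List.pyGet? seq b).map (fun c => [c])).getD [] else dest_aa.toList) = dest_aa.toList := by
    simp only [beq_self_eq_true, Bool.or_true, Bool.not_true, Bool.false_eq_true, if_false]
  rw [hGa, hGb]
  -- the three pure-sequence chunks
  have hchunk : ∀ (u v : Int), 0 ≤ u → v ≤ n → (∀ i, u ≤ i → i < v → ¬(i = a ∨ i = b)) →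
      ((PySem.List.pyRange u v 1).map (fun i =>
        if !(i == a || i == b) then
          ((PySem.List.pyGet? seq i).map (fun c => [c])).getD []
        else dest_aa.toList)).flatten = (seq.drop u.toNat).take (v - u).toNat := by
    intro u v h0 hv havoid
    rw [List.map_congr_left (fun i hi => by
      obtain ⟨hi1, hi2⟩ := PySem.List.mem_pyRange_one.mp hi
      have hne := havoid i hi1 hi2
      have h1 : (i == a) = false := beq_eq_false_iff_ne.mpr (fun h => hne (Or.inl h))
      have h2 : (i == b) = false := beq_eq_false_iff_ne.mpr (fun h => hne (Or.inr h))
      rw [h1, h2])]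
    exact flatten_singletons_seg seq (v - u).toNat u v h0 (by omega) rfl
  rw [hchunk 0 a (by omega) (by omega) (by omega),
    hchunk (a + 1) b (by omega) (by omega) (by omega),
    hchunk (b + 1) n (by omega) (by omega) (by omega)]
  -- match B's slices
  rw [PySem.List.slice_to _ ha, PySem.List.slice_toNat _ (by omega) (by omega),
    PySem.List.slice_from _ (by omega)]
  have e1 : (a - 0).toNat = a.toNat := by omega
  have e2 : (b - (a + 1)).toNat = b.toNat - (a + 1).toNat := by omega
  have e3 : (seq.drop (b + 1).toNat).take (n - (b + 1)).toNat = seq.drop (b + 1).toNat := by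
    apply List.take_of_length_le
    simp
    omega
  rw [e1, e2, e3]
  simp only [Int.toNat_zero, List.drop_zero, List.append_assoc]
  rfl

-- B's nested comprehension over enumerate-and-tail-slices is a map over the combination pairs
theorem flatMap_enum_slices (g : Int → Int → String) (L : List Int) :
    ∀ (xs : List Int) (k : Nat), L.drop k = xs →
    (PySem.List.enumerate xs (k : Int)).flatMap (fun ki =>
        (PySem.List.slice L (some (ki.1 + 1)) none).map (fun j => g ki.2 j))
      = (pyCombPairs xs).map (fun p => g p.1 p.2) := by
  intro xs
  induction xs with
  | nil => intro k _; rfl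
  | cons x rest ih =>
    intro k hL
    rw [PySem.List.enumerate_cons, List.flatMap_cons]
    have hdrop : L.drop (k + 1) = rest := by
      rw [← List.drop_drop, hL]
      rfl
    have hslice : PySem.List.slice L (some ((k : Int) + 1)) none = rest := by
      rw [show ((k : Int) + 1) = ((k + 1 : Nat) : Int) by push_cast; ring,
        PySem.List.slice_from_natCast, hdrop]
    have hcast : ((k : Int) + 1) = ((k + 1 : Nat) : Int) := by push_cast; ring
    rw [hslice, hcast, ih (k + 1) hdrop]
    simp [pyCombPairs, List.map_map, Function.comp_def]

-- the filtered pairs of the full position list are the pairs of the trimmed list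
theorem filter_pairs_eq_trim (M : List Int) (n : Int) (is_C_term : Bool)
    (hM : M.Pairwise (· < ·)) (hb : ∀ i ∈ M, i < n) :
    (pyCombPairs M).filter (fun p => !((p.1 == n - 1 || p.2 == n - 1) && !is_C_term)) =
    pyCombPairs (if !is_C_term && !(M == []) && (PySem.List.pyGet? M (-1) == some (n - 1))
      then PySem.List.slice M none (some (-1)) else M) := by
  cases is_C_term with
  | true =>
    simp only [Bool.not_true, Bool.and_false, Bool.not_false, Bool.false_and]
    rw [if_neg (by simp), List.filter_eq_self.mpr (fun p _ => rfl)]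
  | false =>
    simp only [Bool.not_false, Bool.and_true, Bool.true_and]
    by_cases hlast : M.getLast? = some (n - 1)
    · have hne : M ≠ [] := by intro h; rw [h] at hlast; cases hlast
      have hcond : (!(M == []) && (PySem.List.pyGet? M (-1) == some (n - 1))) = true := by
        rw [pyGet?_neg_one, hlast]
        simp [hne]
      rw [if_pos hcond, PySem.List.slice_to_neg_one]
      have hdecomp : M.dropLast ++ [n - 1] = M := by
        conv_rhs => rw [← List.dropLast_append_getLast hne]
        congr 1
        have := (List.getLast?_eq_getLast_of_ne_nil hne).symm.trans hlast
        simp [Option.some_inj.mp this]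
      have hz : (n - 1) ∉ M.dropLast := by
        intro hmem
        have hpw : (M.dropLast ++ [n - 1]).Pairwise (· < ·) := hdecomp.symm ▸ hM
        have := (List.pairwise_append.mp hpw).2.2 _ hmem (n - 1) (by simp)
        omega
      have hkey := pyCombPairs_filter_concat M.dropLast (n - 1) hz
      rw [hdecomp] at hkey
      rw [hkey]
    · have hmem : (n - 1) ∉ M := fun h => hlast (getLast?_of_mem_max hM hb h)
      have hcond : (!(M == []) && (PySem.List.pyGet? M (-1) == some (n - 1))) = false := by
        rw [pyGet?_neg_one]
        cases h : M.getLast? with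
        | none => simp
        | some z =>
          have : z ≠ n - 1 := fun he => hlast (by rw [h, he])
          simp [this]
      have hnot : ¬ ((!(M == []) && (PySem.List.pyGet? M (-1) == some (n - 1))) = true) := by
        rw [hcond]; simp
      rw [if_neg hnot]
      apply List.filter_eq_self.mpr
      intro p hp
      obtain ⟨h1, h2⟩ := pyCombPairs_mem hp
      have e1 : (p.1 == n - 1) = false := by
        simp only [beq_eq_false_iff_ne, ne_eq]
        exact fun he => hmem (he ▸ h1)
      have e2 : (p.2 == n - 1) = false := by
        simp only [beq_eq_false_iff_ne, ne_eq]
        exact fun he => hmem (he ▸ h2)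
      simp [e1, e2]

-- ===== VERDICT (by name: the statement is the Claim_ definition above) =====
theorem add_loop_linker_spec : Claim_equal_add_loop_linker := by
  intro sequence is_C_term src_aa dest_aa _
  simp only [Spec_add_loop_linker, add_loop_linker, add_loop_linker_alt]
  rw [positions_eq]
  set n := PySem.Str.len sequence with hn
  set M := (PySem.List.pyRange 0 n 1).filter
      (fun i => ((PySem.Str.pyGet? sequence i).map (fun c => String.ofList [c])) == some src_aa)
    with hMdef
  have hMpw : M.Pairwise (· < ·) :=
    List.Pairwise.filter _ (PySem.List.pairwise_lt_pyRange_one 0 n)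
  have hMb : ∀ i ∈ M, 0 ≤ i ∧ i < n := by
    intro i hi
    exact PySem.List.mem_pyRange_one.mp (List.mem_filter.mp hi).1
  -- A's loop as filter-then-map
  have hA : (pyCombPairs M).foldl
      (fun result indices =>
        if (indices.1 == n - 1 || indices.2 == n - 1) && !is_C_term then result
        else result ++ [PySem.Str.join ""
          ((PySem.List.pyRange 0 n 1).map (fun i =>
            if !(i == indices.1 || i == indices.2) then
              ((PySem.Str.pyGet? sequence i).map (fun c => String.ofList [c])).getD ""
            else dest_aa))]) [] =
      ((pyCombPairs M).filter (fun p => !((p.1 == n - 1 || p.2 == n - 1) && !is_C_term))).map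
        (fun p => PySem.Str.join ""
          ((PySem.List.pyRange 0 n 1).map (fun i =>
            if !(i == p.1 || i == p.2) then
              ((PySem.Str.pyGet? sequence i).map (fun c => String.ofList [c])).getD ""
            else dest_aa))) := by
    rw [show (fun (result : List String) (indices : Int × Int) =>
        if (indices.1 == n - 1 || indices.2 == n - 1) && !is_C_term then result
        else result ++ [PySem.Str.join ""
          ((PySem.List.pyRange 0 n 1).map (fun i =>
            if !(i == indices.1 || i == indices.2) then
              ((PySem.Str.pyGet? sequence i).map (fun c => String.ofList [c])).getD ""
            else dest_aa))]) = (fun result indices =>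
        if (!((indices.1 == n - 1 || indices.2 == n - 1) && !is_C_term)) then
          result ++ [PySem.Str.join ""
            ((PySem.List.pyRange 0 n 1).map (fun i =>
              if !(i == indices.1 || i == indices.2) then
                ((PySem.Str.pyGet? sequence i).map (fun c => String.ofList [c])).getD ""
              else dest_aa))]
        else result) from by
      funext r p
      cases h : ((p.1 == n - 1 || p.2 == n - 1) && !is_C_term) <;> simp]
    rw [PySem.List.foldl_append_if]
    rfl
  rw [hA, filter_pairs_eq_trim M n is_C_term hMpw (fun i hi => (hMb i hi).2)]
  set T := (if !is_C_term && !(M == []) && (PySem.List.pyGet? M (-1) == some (n - 1))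
      then PySem.List.slice M none (some (-1)) else M) with hT
  have hTsub : ∀ i ∈ T, i ∈ M := by
    intro i hi
    rw [hT] at hi
    split at hi
    · exact PySem.List.mem_of_mem_slice _ _ _ hi
    · exact hi
  have hTpw : T.Pairwise (· < ·) := by
    rw [hT]
    split
    · rw [PySem.List.slice_to_neg_one]
      exact hMpw.sublist (List.dropLast_sublist M)
    · exact hMpw
  have hB := flatMap_enum_slices (fun i j => altSplice sequence dest_aa i j) T T 0 rfl
  rw [Nat.cast_zero] at hB
  rw [hB]
  apply List.map_congr_left
  intro p hp
  obtain ⟨h1, h2⟩ := pyCombPairs_mem hp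
  exact splice_eq sequence dest_aa p.1 p.2 (hMb _ (hTsub _ h1)).1 (pyCombPairs_lt hTpw p hp)
    (hMb _ (hTsub _ h2)).2
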